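-- pv_equiv track=rewrite | github.com/souten-yd/CodeAgentPersonal | tests/test_docker_torch_stack_contract.py | _extract_run_python_blocks
-- ===== SOURCE A (Python) =====
-- def _extract_run_python_blocks(dockerfile: str) -> list[str]:
--     blocks: list[str] = []
--     marker = "RUN "
--     start = 0
--     while True:
--         idx = dockerfile.find(marker, start)
--         if idx == -1:
--             break
--         end = dockerfile.find("\nRUN ", idx + 1)
--         if end == -1:
--             end = len(dockerfile)
--         block = dockerfile[idx:end]
--         if "<<'PY'" in block:
--             blocks.append(block)
--         start = idx + 1
--     return blocks
-- ===== SOURCE B (Python) =====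
-- def _extract_run_python_blocks(dockerfile: str) -> list[str]:
--     n = len(dockerfile)
--     starts = [i for i in range(n) if dockerfile.startswith("RUN ", i)]
--     bounds = [i for i in range(n) if dockerfile.startswith("\nRUN ", i)]
--     blocks: list[str] = []
--     j = 0
--     for idx in starts:
--         while j < len(bounds) and bounds[j] < idx + 1:
--             j += 1
--         end = bounds[j] if j < len(bounds) else n
--         block = dockerfile[idx:end]
--         if "<<'PY'" in block:
--             blocks.append(block)
--     return blocks
-- ===== Notes on version B (the rewrite author's own statement) =====
-- stated objective: alternative
-- what changed: Instead of A's while-loop of repeated str.find re-scans, B precomputes in one preliminary pass the sorted index lists of all marker start positions and all newline-marker boundary positions, then emits the blocks by a single two-pointer merge over the two lists, each block ending at the first boundary past its start (or at the end of the string).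
import Mathlib
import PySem

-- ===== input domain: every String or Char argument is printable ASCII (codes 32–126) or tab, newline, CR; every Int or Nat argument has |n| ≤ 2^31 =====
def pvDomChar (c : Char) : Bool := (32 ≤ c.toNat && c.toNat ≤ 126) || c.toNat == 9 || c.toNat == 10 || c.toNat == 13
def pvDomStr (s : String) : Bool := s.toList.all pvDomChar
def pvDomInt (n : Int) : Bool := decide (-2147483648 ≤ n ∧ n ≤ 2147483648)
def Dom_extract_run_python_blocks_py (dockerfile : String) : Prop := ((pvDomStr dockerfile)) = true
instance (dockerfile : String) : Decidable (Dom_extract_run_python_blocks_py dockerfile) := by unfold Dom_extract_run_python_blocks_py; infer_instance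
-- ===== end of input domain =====

-- B replaces A's repeated str.find re-scans by one precomputation of all "RUN " start
-- positions and all "\nRUN " boundary positions, then a single two-pointer merge over the
-- two sorted index lists (objective: alternative decomposition; same results, return value only).

-- ===== PORT A =====
-- the while-loop, one call per iteration; fuel s.length+1 bounds the number of iterations
-- (each found idx satisfies start ≤ idx < s.length and the next start is idx+1, so at most
-- s.length starts are examined before find returns -1); within fuel it is step-for-step A's loop.
def pvALoop (s : List Char) : Nat → Nat → List String
  | 0, _ => []
  | fuel+1, start =>
    let idx := PySem.Chars.findFrom s "RUN ".toList (start : Int)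
    if idx = -1 then []
    else
      let e0 := PySem.Chars.findFrom s "\nRUN ".toList (idx + 1)
      let e : Int := if e0 = -1 then (s.length : Int) else e0
      let block := PySem.List.slice s (some idx) (some e)
      (if PySem.Chars.isIn "<<'PY'".toList block then [String.ofList block] else []) ++
        pvALoop s fuel (idx.toNat + 1)

def extract_run_python_blocks_py (dockerfile : String) : List String :=
  pvALoop dockerfile.toList (dockerfile.toList.length + 1) 0

-- ===== PORT B =====
-- the inner 'while j < len(bounds) and bounds[j] < idx + 1: j += 1'
def pvAdvance (bounds : List Nat) (t : Nat) (j : Nat) : Nat :=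
  if h : j < bounds.length then
    (if bounds[j] < t then pvAdvance bounds t (j+1) else j)
  else j
termination_by bounds.length - j

-- the 'for idx in starts' loop carrying the boundary pointer j
def pvBLoop (s : List Char) (n : Nat) (bounds : List Nat) : Nat → List Nat → List String
  | _, [] => []
  | j, idx :: rest =>
    let j' := pvAdvance bounds (idx + 1) j
    let e := if h : j' < bounds.length then bounds[j'] else n
    let block := PySem.List.slice s (some (idx : Int)) (some (e : Int))
    (if PySem.Chars.isIn "<<'PY'".toList block then [String.ofList block] else []) ++
      pvBLoop s n bounds j' rest

-- dockerfile.startswith(p, i) with 0 ≤ i is exactly 'p is a prefix of s[i:]'; the indices of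
-- range(n) are nonnegative, so List.range n ports range(n) exactly.
def extract_run_python_blocks_py_alt (dockerfile : String) : List String :=
  let s := dockerfile.toList
  let n := s.length
  let starts := (List.range n).filter (fun i => PySem.Chars.startswith (s.drop i) "RUN ".toList)
  let bounds := (List.range n).filter (fun i => PySem.Chars.startswith (s.drop i) "\nRUN ".toList)
  pvBLoop s n bounds 0 starts

-- ===== PRECONDITION & SPEC =====
def Spec_extract_run_python_blocks_py (dockerfile : String) (out : List String) : Prop := out = extract_run_python_blocks_py_alt dockerfile
instance (dockerfile : String) (out : List String) : Decidable (Spec_extract_run_python_blocks_py dockerfile out) := by unfold Spec_extract_run_python_blocks_py; infer_instance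

-- ===== CLAIM (what is proved, stated in full; the proofs are below) =====
def Claim_equal_extract_run_python_blocks_py : Prop := ∀ (dockerfile : String), Dom_extract_run_python_blocks_py dockerfile → Spec_extract_run_python_blocks_py dockerfile (extract_run_python_blocks_py dockerfile)

-- ===== LEMMAS AND PROOFS =====

-- the common description both loops are reduced to: for each start index, the block ends at
-- the first "\nRUN " boundary ≥ idx+1 (else at n), and is kept when it contains "<<'PY'"
def pvFirstGe (bounds : List Nat) (t n : Nat) : Nat :=
  match bounds.find? (fun b => t ≤ b) with
  | some b => b
  | none => n

def pvSpec (s : List Char) (n : Nat) (bounds : List Nat) (starts : List Nat) : List String :=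
  starts.flatMap (fun idx =>
    let e : Nat := pvFirstGe bounds (idx+1) n
    let block := PySem.List.slice s (some (idx : Int)) (some (e : Int))
    if PySem.Chars.isIn "<<'PY'".toList block then [String.ofList block] else [])

lemma pv_find?_eq_getElem? {α : Type} (l : List α) (p : α → Bool) (j : Nat)
    (hlt : ∀ i, (h : i < l.length) → i < j → p l[i] = false)
    (hj : ∀ (h : j < l.length), p l[j] = true) : l.find? p = l[j]? := by
  induction l generalizing j with
  | nil => simp
  | cons x xs ih =>
    cases j with
    | zero =>
      by_cases h0 : 0 < (x :: xs).length
      · have := hj h0; simp at this; simp [List.find?, this]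
      · simp at h0
    | succ k =>
      have hx : p x = false := hlt 0 (by simp) (Nat.succ_pos k)
      simp [List.find?, hx]
      exact ih k (fun i h hik => hlt (i+1) (by simpa using Nat.succ_lt_succ h) (Nat.succ_lt_succ hik))
        (fun h => hj (Nat.succ_lt_succ h))

lemma pvAdvance_facts (bounds : List Nat) (t j : Nat)
    (hj : ∀ i, (h : i < bounds.length) → i < j → bounds[i] < t) :
    j ≤ pvAdvance bounds t j ∧
    (∀ i, (h : i < bounds.length) → i < pvAdvance bounds t j → bounds[i] < t) ∧
    (∀ (h : pvAdvance bounds t j < bounds.length), t ≤ bounds[pvAdvance bounds t j]) := by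
  by_cases h : j < bounds.length
  · by_cases hb : bounds[j] < t
    · have ih := pvAdvance_facts bounds t (j+1)
        (fun i hi hij => by rcases Nat.lt_succ_iff_lt_or_eq.mp hij with hlt | rfl
                            exacts [hj i hi hlt, hb])
      rw [pvAdvance, dif_pos h, if_pos hb]
      exact ⟨Nat.le_trans (Nat.le_succ j) ih.1, ih.2.1, ih.2.2⟩
    · rw [pvAdvance, dif_pos h, if_neg hb]
      exact ⟨le_refl j, hj, fun _ => Nat.le_of_not_lt hb⟩
  · rw [pvAdvance, dif_neg h]
    exact ⟨le_refl j, hj, fun hc => absurd hc h⟩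
termination_by bounds.length - j

lemma pv_find?_sorted_eq_some {l : List Nat} (hl : l.Pairwise (· < ·)) {p : Nat → Bool} {m : Nat}
    (hm : m ∈ l) (hpm : p m = true) (hleast : ∀ i ∈ l, p i = true → m ≤ i) :
    l.find? p = some m := by
  induction l with
  | nil => simp at hm
  | cons x xs ih =>
    rcases List.mem_cons.mp hm with rfl | hmx
    · simp [List.find?, hpm]
    · have hxm : x < m := (List.pairwise_cons.mp hl).1 m hmx
      have hpx : p x = false := by
        by_contra hc
        have := hleast x (List.mem_cons_self) (by simpa using hc)
        omega
      simp [List.find?, hpx]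
      exact ih (List.pairwise_cons.mp hl).2 hmx (fun i hi => hleast i (List.mem_cons_of_mem _ hi))

lemma pv_filter_ge_cons {l : List Nat} (hl : l.Pairwise (· < ·)) {k m : Nat} {rest : List Nat}
    (h : l.filter (fun i => decide (k ≤ i)) = m :: rest) :
    l.filter (fun i => decide (m + 1 ≤ i)) = rest := by
  induction l with
  | nil => simp at h
  | cons x xs ih =>
    have hpw := List.pairwise_cons.mp hl
    by_cases hkx : k ≤ x
    · rw [List.filter_cons_of_pos (by simpa using hkx)] at h
      obtain ⟨rfl, hrest⟩ : x = m ∧ xs.filter (fun i => decide (k ≤ i)) = rest := by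
        constructor <;> [exact (List.cons.injEq _ _ _ _ ▸ h).1; exact (List.cons.injEq _ _ _ _ ▸ h).2]
      rw [List.filter_cons_of_neg (by simp)]
      rw [← hrest]
      apply List.filter_congr
      intro y hy
      have := hpw.1 y hy
      simp; omega
    · rw [List.filter_cons_of_neg (by simpa using hkx)] at h
      have hrest := ih hpw.2 h
      have hm : m ∈ xs := by
        have : m ∈ xs.filter (fun i => decide (k ≤ i)) := by rw [h]; exact List.mem_cons_self
        exact (List.mem_filter.mp this).1
      have hxm := hpw.1 m hm
      rw [List.filter_cons_of_neg (by simp; omega)]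
      exact hrest

lemma pv_prefix_lt {sub s : List Char} (hne : sub ≠ []) {i : Nat} (h : sub <+: s.drop i) :
    i < s.length := by
  by_contra hc
  rw [List.drop_of_length_le (by omega)] at h
  exact hne (List.prefix_nil.mp h)

lemma pv_infix_drop_iff (sub s : List Char) (k : Nat) :
    sub <:+: s.drop k ↔ ∃ i, k ≤ i ∧ sub <+: s.drop i := by
  rw [← PySem.Chars.isIn_iff_infix, ← PySem.Chars.exists_prefix_drop_iff_isIn]
  constructor
  · rintro ⟨j, hj⟩
    exact ⟨k + j, Nat.le_add_right _ _, by rwa [List.drop_drop] at hj⟩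
  · rintro ⟨i, hki, hi⟩
    exact ⟨i - k, by rw [List.drop_drop, Nat.add_sub_cancel' hki]; exact hi⟩

lemma pv_mem_occ (s : List Char) (sub : List Char) (i : Nat) :
    i ∈ (List.range s.length).filter (fun i => PySem.Chars.startswith (s.drop i) sub) ↔
      i < s.length ∧ sub <+: s.drop i := by
  simp [List.mem_filter, List.mem_range, PySem.Chars.startswith, List.isPrefixOf_iff_prefix]

lemma pvBLoop_eq_spec (s : List Char) (n : Nat) (bounds : List Nat) :
    ∀ (starts : List Nat) (j : Nat), starts.Pairwise (· ≤ ·) →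
    (∀ i, (h : i < bounds.length) → i < j → ∀ idx ∈ starts, bounds[i] < idx + 1) →
    pvBLoop s n bounds j starts = pvSpec s n bounds starts := by
  intro starts
  induction starts with
  | nil => intro j _ _; simp [pvBLoop, pvSpec]
  | cons idx rest ih =>
    intro j hpw hinv
    have hfacts := pvAdvance_facts bounds (idx + 1) j
      (fun i h hij => hinv i h hij idx List.mem_cons_self)
    set j' := pvAdvance bounds (idx + 1) j with hj'
    have hfind : bounds.find? (fun b => idx + 1 ≤ b) = bounds[j']? := by
      apply pv_find?_eq_getElem?
      · intro i h hij
        have := hfacts.2.1 i h hij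
        simp; omega
      · intro h
        have := hfacts.2.2 h
        simp; omega
    have he : (if h : j' < bounds.length then bounds[j'] else n) = pvFirstGe bounds (idx + 1) n := by
      unfold pvFirstGe
      rw [hfind]
      by_cases h : j' < bounds.length
      · rw [dif_pos h, List.getElem?_eq_getElem h]
      · rw [dif_neg h, List.getElem?_eq_none (by omega)]
    rw [pvBLoop, pvSpec, List.flatMap_cons, ← pvSpec]
    rw [he]
    congr 1
    apply ih j' (List.pairwise_cons.mp hpw).2
    intro i h hij idx' hidx'
    have hb := hfacts.2.1 i h hij
    have := (List.pairwise_cons.mp hpw).1 idx' hidx'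
    omega

lemma pvALoop_eq_spec (s : List Char) :
    ∀ (fuel k : Nat), k ≤ s.length →
    (((List.range s.length).filter (fun i => PySem.Chars.startswith (s.drop i) "RUN ".toList)).filter
        (fun i => decide (k ≤ i))).length < fuel →
    pvALoop s fuel k =
      pvSpec s s.length
        ((List.range s.length).filter (fun i => PySem.Chars.startswith (s.drop i) "\nRUN ".toList))
        (((List.range s.length).filter (fun i => PySem.Chars.startswith (s.drop i) "RUN ".toList)).filter
          (fun i => decide (k ≤ i))) := by
  intro fuel
  induction fuel with
  | zero => intro k _ h; omega
  | succ fuel ih =>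
    intro k hk hlen
    set n := s.length with hn
    set sub1 : List Char := "RUN ".toList with hsub1
    set sub2 : List Char := "\nRUN ".toList with hsub2
    set starts := (List.range n).filter (fun i => PySem.Chars.startswith (s.drop i) sub1) with hstarts
    set bounds := (List.range n).filter (fun i => PySem.Chars.startswith (s.drop i) sub2) with hbounds
    have hstartsPW : starts.Pairwise (· < ·) := List.Pairwise.filter _ List.pairwise_lt_range
    have hboundsPW : bounds.Pairwise (· < ·) := List.Pairwise.filter _ List.pairwise_lt_range
    have hsub1ne : sub1 ≠ [] := by decide
    have hsub2ne : sub2 ≠ [] := by decide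
    rcases hF : starts.filter (fun i => decide (k ≤ i)) with _ | ⟨m, rest⟩
    · -- no further occurrence: find returns -1, both sides empty
      have hnoinf : ¬ sub1 <:+: s.drop k := by
        rw [pv_infix_drop_iff]
        rintro ⟨i, hki, hi⟩
        have hilt : i < n := pv_prefix_lt hsub1ne hi
        have : i ∈ starts.filter (fun i => decide (k ≤ i)) := by
          rw [List.mem_filter, hstarts]
          exact ⟨(pv_mem_occ s sub1 i).mpr ⟨hilt, hi⟩, by simpa using hki⟩
        rw [hF] at this; simp at this
      have hidx : PySem.Chars.findFrom s sub1 (k : Int) = -1 :=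
        (PySem.Chars.findFrom_natCast_eq_neg_one_iff s sub1 k hk).mpr hnoinf
      simp only [pvALoop]
      rw [← hsub1, ← hn, hidx]
      simp [pvSpec]
    · -- next occurrence is m, the head of the filtered occurrence list
      have hmmem : m ∈ starts.filter (fun i => decide (k ≤ i)) := by rw [hF]; exact List.mem_cons_self
      have hmS := List.mem_filter.mp hmmem
      have hmocc := (pv_mem_occ s sub1 m).mp (hstarts ▸ hmS.1)
      have hkm : k ≤ m := by simpa using hmS.2
      have hleast : ∀ i ∈ starts, k ≤ i → m ≤ i := by
        intro i hi hki
        have : i ∈ m :: rest := by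
          rw [← hF, List.mem_filter]; exact ⟨hi, by simpa using hki⟩
        rcases List.mem_cons.mp this with rfl | hir
        · exact le_refl _
        · have hpwF : (m :: rest).Pairwise (· < ·) := hF ▸ List.Pairwise.filter _ hstartsPW
          exact Nat.le_of_lt ((List.pairwise_cons.mp hpwF).1 i hir)
      have hne : PySem.Chars.findFrom s sub1 (k : Int) ≠ -1 := by
        intro hno
        exact absurd ((pv_infix_drop_iff sub1 s k).mpr ⟨m, hkm, hmocc.2⟩)
          ((PySem.Chars.findFrom_natCast_eq_neg_one_iff s sub1 k hk).mp hno)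
      obtain ⟨hkle, hpref, hmin⟩ := PySem.Chars.findFrom_natCast_spec s sub1 k hk hne
      set idx := PySem.Chars.findFrom s sub1 (k : Int) with hidxdef
      have hidx0 : 0 ≤ idx := le_trans (by positivity) hkle
      have hidxlt : idx.toNat < n := pv_prefix_lt hsub1ne hpref
      have hidxk : k ≤ idx.toNat := by omega
      have hidxm : idx.toNat = m := by
        have h1 : m ≤ idx.toNat := hleast idx.toNat ((pv_mem_occ s sub1 idx.toNat).mpr ⟨hidxlt, hpref⟩) hidxk
        have h2 : ¬ m < idx.toNat := fun hc => hmin m hkm hc hmocc.2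
        omega
      have hidxeq : idx = (m : Int) := by omega
      have hk2 : m + 1 ≤ n := hmocc.1
      have hcast : idx + 1 = ((m + 1 : Nat) : Int) := by omega
      have hend : (if PySem.Chars.findFrom s sub2 (idx + 1) = -1 then (n : Int)
            else PySem.Chars.findFrom s sub2 (idx + 1)) = ((pvFirstGe bounds (m + 1) n : Nat) : Int) := by
        rw [hcast]
        by_cases heq : PySem.Chars.findFrom s sub2 ((m + 1 : Nat) : Int) = -1
        · have hnoinf2 := (PySem.Chars.findFrom_natCast_eq_neg_one_iff s sub2 (m+1) hk2).mp heq
          have hnone : bounds.find? (fun b => m + 1 ≤ b) = none := by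
            rw [List.find?_eq_none]
            intro b hb hble
            have hocc := (pv_mem_occ s sub2 b).mp (hbounds ▸ hb)
            exact hnoinf2 ((pv_infix_drop_iff sub2 s (m+1)).mpr ⟨b, by simpa using hble, hocc.2⟩)
          rw [if_pos heq]
          unfold pvFirstGe
          rw [hnone]
        · obtain ⟨hkle2, hpref2, hmin2⟩ := PySem.Chars.findFrom_natCast_spec s sub2 (m+1) hk2 heq
          set e0 := PySem.Chars.findFrom s sub2 ((m + 1 : Nat) : Int) with he0def
          have he00 : 0 ≤ e0 := le_trans (by positivity) hkle2
          have he0lt : e0.toNat < n := pv_prefix_lt hsub2ne hpref2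
          have hsome : bounds.find? (fun b => m + 1 ≤ b) = some e0.toNat := by
            apply pv_find?_sorted_eq_some hboundsPW
            · exact (pv_mem_occ s sub2 e0.toNat).mpr ⟨he0lt, hpref2⟩
            · simp; omega
            · intro b hb hble
              have hocc := (pv_mem_occ s sub2 b).mp (hbounds ▸ hb)
              have : ¬ b < e0.toNat := fun hc => hmin2 b (by simpa using hble) hc hocc.2
              omega
          rw [if_neg heq]
          unfold pvFirstGe
          rw [hsome]
          show e0 = ((e0.toNat : Nat) : Int)
          omega
      -- rest of the filtered occurrence list
      have hrest : starts.filter (fun i => decide (m + 1 ≤ i)) = rest := pv_filter_ge_cons hstartsPW hF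
      have hrec : pvALoop s fuel (idx.toNat + 1) = pvSpec s n bounds rest := by
        rw [hidxm, ← hrest]
        exact ih (m+1) hk2 (by rw [hrest]; have := hF ▸ hlen; simpa using this)
      simp only [pvALoop]
      rw [← hsub1, ← hsub2, ← hn, ← hidxdef, if_neg hne, hend, hrec, hidxeq]
      simp only [pvSpec, List.flatMap_cons]

-- ===== VERDICT (by name: the statement is the Claim_ definition above) =====
theorem extract_run_python_blocks_py_spec : Claim_equal_extract_run_python_blocks_py := by
  intro dockerfile _
  unfold Spec_extract_run_python_blocks_py
  unfold extract_run_python_blocks_py extract_run_python_blocks_py_alt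
  set s := dockerfile.toList with hs
  set n := s.length with hn
  set starts := (List.range n).filter (fun i => PySem.Chars.startswith (s.drop i) "RUN ".toList) with hstarts
  set bounds := (List.range n).filter (fun i => PySem.Chars.startswith (s.drop i) "\nRUN ".toList) with hbounds
  have hA : pvALoop s (n + 1) 0 = pvSpec s n bounds starts := by
    have h0 : starts.filter (fun i => decide (0 ≤ i)) = starts :=
      List.filter_eq_self.mpr (fun a _ => by simp)
    have hlen : (starts.filter (fun i => decide (0 ≤ i))).length < n + 1 := by
      rw [h0]
      exact Nat.lt_succ_of_le (le_trans (List.length_filter_le _ _) (by simp))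
    have := pvALoop_eq_spec s (n + 1) 0 (Nat.zero_le _) hlen
    rw [h0] at this
    exact this
  have hB : pvBLoop s n bounds 0 starts = pvSpec s n bounds starts := by
    apply pvBLoop_eq_spec
    · exact (List.Pairwise.filter _ List.pairwise_lt_range).imp le_of_lt
    · intro i h hi0; omega
  rw [hA, hB]
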